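-- pv_equiv track=rewrite | github.com/ajayferd/personal_projects | projects/CIS3362/RSA3-solve.py | convert
-- ===== SOURCE A (Python) =====
-- def convert(mystr, blocksize):
--
--     val = 0
--
--     # Go through each letter.
--     for i in range(blocksize):
--
--         # Get value of current letter.
--         num = 0
--         if i < len(mystr):
--             num = ord(mystr[i]) - ord('a')
--
--         # Add in the contribution of this letter.
--         val = 26*val + num
--
--     # Ta da!
--     return val
-- ===== SOURCE B (Python) =====
-- def convert(mystr, blocksize):
--     total = 0
--     place = 1
--     for i in range(blocksize - 1, -1, -1):
--         num = ord(mystr[i]) - ord('a') if i < len(mystr) else 0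
--         total += num * place
--         place *= 26
--     return total
-- ===== Notes on version B (the rewrite author's own statement) =====
-- stated objective: alternative
-- what changed: Replaces the forward Horner recurrence (val = 26*val + num) with a back-to-front positional sum that maintains an explicit place-value multiplier (total += num*place; place *= 26).
import Mathlib
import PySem

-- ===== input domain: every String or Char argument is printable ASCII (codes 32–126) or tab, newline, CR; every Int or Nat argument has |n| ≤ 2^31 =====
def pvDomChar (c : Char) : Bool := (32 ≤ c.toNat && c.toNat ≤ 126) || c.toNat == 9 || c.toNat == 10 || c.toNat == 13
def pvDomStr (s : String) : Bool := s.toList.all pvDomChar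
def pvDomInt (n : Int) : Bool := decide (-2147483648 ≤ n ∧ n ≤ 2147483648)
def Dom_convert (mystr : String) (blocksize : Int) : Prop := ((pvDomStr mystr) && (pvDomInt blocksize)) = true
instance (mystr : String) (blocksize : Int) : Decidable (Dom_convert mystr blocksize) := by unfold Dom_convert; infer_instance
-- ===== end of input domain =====

-- B computes the same base-26 value by a back-to-front positional sum with an explicit
-- place multiplier instead of A's forward Horner recurrence (objective: alternative).

-- ===== PORT A =====
-- letter value at position i: ord(mystr[i]) - ord('a') if i < len(mystr) else 0
-- (the guard makes the index always in range, so the .getD default is never used)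
def pvNum (mystr : String) (i : Int) : Int :=
  if i < (mystr.toList.length : Int) then
    (((PySem.Str.pyGet? mystr i).getD 'a').toNat : Int) - 97
  else 0

def convert (mystr : String) (blocksize : Int) : Int :=
  (PySem.List.pyRange 0 blocksize 1).foldl
    (fun val i => 26 * val + pvNum mystr i) 0

-- ===== PORT B =====
def convert_alt (mystr : String) (blocksize : Int) : Int :=
  ((PySem.List.pyRange (blocksize - 1) (-1) (-1)).foldl
    (fun tp i => (tp.1 + pvNum mystr i * tp.2, tp.2 * 26)) ((0 : Int), (1 : Int))).1

-- ===== PRECONDITION & SPEC =====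
def Spec_convert (mystr : String) (blocksize : Int) (out : Int) : Prop := out = convert_alt mystr blocksize
instance (mystr : String) (blocksize : Int) (out : Int) : Decidable (Spec_convert mystr blocksize out) := by unfold Spec_convert; infer_instance

-- ===== CLAIM (what is proved, stated in full; the proofs are below) =====
def Claim_equal_convert : Prop := ∀ (mystr : String) (blocksize : Int), Dom_convert mystr blocksize → Spec_convert mystr blocksize (convert mystr blocksize)

-- ===== LEMMAS AND PROOFS =====

-- reference value: Horner on the first k positions
def pvH (f : Int → Int) : Nat → Int
  | 0 => 0
  | k + 1 => 26 * pvH f k + f k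

theorem pvA_eq (f : Int → Int) (k : Nat) :
    (PySem.List.pyRange 0 (k : Int) 1).foldl (fun val i => 26 * val + f i) 0 = pvH f k := by
  induction k with
  | zero => simp [PySem.List.pyRange_one_eq_nil, pvH]
  | succ k ih =>
      have h : ((k : Int) + 1) = ((k + 1 : Nat) : Int) := by push_cast; ring
      rw [pvH, ← ih, ← h, PySem.List.pyRange_one_succ_right (by positivity), List.foldl_append]
      simp

theorem pvB_gen (f : Int → Int) (k : Nat) (t p : Int) :
    (PySem.List.pyRange ((k : Int) - 1) (-1) (-1)).foldl
      (fun tp i => (tp.1 + f i * tp.2, tp.2 * 26)) (t, p)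
      = (t + p * pvH f k, p * 26 ^ k) := by
  induction k generalizing t p with
  | zero =>
      rw [show ((0 : Nat) : Int) - 1 = -1 by norm_num,
        PySem.List.pyRange_neg_one_eq_nil le_rfl]
      simp [pvH]
  | succ k ih =>
      have h : ((k + 1 : Nat) : Int) - 1 = (k : Int) := by push_cast; ring
      rw [h, PySem.List.pyRange_neg_one_cons (by omega), List.foldl_cons, ih]
      simp only [Prod.mk.injEq, pvH]
      constructor <;> ring

theorem convert_eq_alt (mystr : String) (blocksize : Int) :
    convert mystr blocksize = convert_alt mystr blocksize := by
  unfold convert convert_alt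
  rcases le_or_gt blocksize 0 with h | h
  · rw [PySem.List.pyRange_one_eq_nil h, PySem.List.pyRange_neg_one_eq_nil (by omega)]
    simp
  · have hk : blocksize = (blocksize.toNat : Int) := by omega
    rw [hk, pvA_eq, pvB_gen]
    ring

-- ===== VERDICT (by name: the statement is the Claim_ definition above) =====
theorem convert_spec : Claim_equal_convert := by
  intro mystr blocksize _
  exact convert_eq_alt mystr blocksize
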